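-- pv_equiv track=rewrite | github.com/Prammi/Python | Alogrithms/absSum.py | getAbsSum
-- ===== SOURCE A (Python) =====
-- def getAbsSum(input,sum):
--     c=0
--     l=0
--     r=len(input)-1
--     while l < len(input)-1:
--         if(r==l):
--             l=l+1
--             r=len(input)-1
--         if abs(input[l]-input[r])==sum:
--             c=c+1
--         r=r-1
--
--     return c
-- ===== SOURCE B (Python) =====
-- def getAbsSum(input, sum):
--     # one-pass frequency hashmap: for each x, pairs with earlier elements y
--     # satisfying |x - y| == sum are exactly the earlier occurrences of
--     # x - sum and (when sum != 0) x + sum.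
--     if sum < 0:
--         return 0
--     c = 0
--     freq = {}
--     for x in input:
--         c += freq.get(x - sum, 0)
--         if sum != 0:
--             c += freq.get(x + sum, 0)
--         freq[x] = freq.get(x, 0) + 1
--     return c
-- ===== Notes on version B (the rewrite author's own statement) =====
-- stated objective: faster
-- what changed: replaces the quadratic two-index while-loop scan with a single pass that keeps a frequency hashmap of earlier elements and looks up x-sum and x+sum for each element
-- intended difference: when sum == 0 and len(input) >= 2, A's final iteration compares input[n-1] with itself and returns the pair count plus one, while B returns the true number of index pairs i<j with |input[i]-input[j]| == sum, which is the intended value. — e.g. on getAbsSum([1, 2], 0): A returns 1, B returns 0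
import Mathlib
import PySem

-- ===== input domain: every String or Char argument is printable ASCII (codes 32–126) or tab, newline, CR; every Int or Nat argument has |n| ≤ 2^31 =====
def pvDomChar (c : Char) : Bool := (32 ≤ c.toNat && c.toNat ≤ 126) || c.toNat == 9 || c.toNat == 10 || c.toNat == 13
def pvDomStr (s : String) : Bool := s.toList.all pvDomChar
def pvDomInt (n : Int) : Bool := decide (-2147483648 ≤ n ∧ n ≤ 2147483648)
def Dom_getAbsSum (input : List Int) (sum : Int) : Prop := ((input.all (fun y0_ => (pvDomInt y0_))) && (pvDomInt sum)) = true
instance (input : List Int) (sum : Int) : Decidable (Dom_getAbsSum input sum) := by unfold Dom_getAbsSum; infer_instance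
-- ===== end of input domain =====

-- B replaces A's quadratic two-index while-loop with a one-pass frequency-hashmap count;
-- A's accidental extra self-pair when sum = 0 and len ≥ 2 is stated as an intended difference (D_).


-- ===== PORT A =====
-- while loop of A, ported with fuel (the fuel only makes the recursion total: the top-level
-- call passes more fuel than the loop can ever consume, see lemma getAbsSumGo_eq below).
-- Indexing uses pyGetD: every index the loop reads is in range (0 ≤ l,r < len), so this
-- equals Python's input[l], input[r] exactly.
def getAbsSumGo (input : List Int) (sum : Int) : Nat → Int → Int → Int → Int
  | 0, _, _, c => c
  | fuel + 1, l, r, c =>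
    if l < (input.length : Int) - 1 then
      let lr := if r = l then (l + 1, (input.length : Int) - 1) else (l, r)
      let c' := if |PySem.List.pyGetD input lr.1 0 - PySem.List.pyGetD input lr.2 0| = sum then c + 1 else c
      getAbsSumGo input sum fuel lr.1 (lr.2 - 1) c'
    else c

def getAbsSum (input : List Int) (sum : Int) : Int :=
  getAbsSumGo input sum ((input.length + 1) * (input.length + 2)) 0 ((input.length : Int) - 1) 0

-- ===== PORT B =====
-- loop body of B: look up earlier occurrences of x - sum and (when sum ≠ 0) x + sum,
-- then record x in the frequency dict.
def altStep (sum : Int) (st : Int × PySem.Dict Int Int) (x : Int) : Int × PySem.Dict Int Int :=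
  let c := st.1 + st.2.getD (x - sum) 0
  let c := if sum ≠ 0 then c + st.2.getD (x + sum) 0 else c
  (c, st.2.insert x (st.2.getD x 0 + 1))

def getAbsSum_alt (input : List Int) (sum : Int) : Int :=
  if sum < 0 then 0
  else (input.foldl (altStep sum) (0, PySem.Dict.empty)).1

-- ===== PRECONDITION & SPEC =====
-- When sum = 0 and len(input) ≥ 2, A's final iteration compares input[n-1] with itself and
-- returns the pair count plus one; B returns the true number of index pairs i < j with
-- |input[i] - input[j]| = sum, which is the intended value.
def D_getAbsSum (input : List Int) (sum : Int) : Prop := sum = 0 ∧ 2 ≤ input.length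
instance (input : List Int) (sum : Int) : Decidable (D_getAbsSum input sum) := by
  unfold D_getAbsSum; infer_instance

def Spec_getAbsSum (input : List Int) (sum : Int) (out : Int) : Prop :=
  ¬ D_getAbsSum input sum → out = getAbsSum_alt input sum
instance (input : List Int) (sum : Int) (out : Int) : Decidable (Spec_getAbsSum input sum out) := by
  unfold Spec_getAbsSum; infer_instance

def pvDiffWitness_getAbsSum : List Int × Int := ([1, 2], 0)
def pvDiffWitnessOut_getAbsSum : Int × Int := (1, 0)

-- ===== CLAIM (what is proved, stated in full; the proofs are below) =====
def Claim_unchanged_getAbsSum : Prop := ∀ (input : List Int) (sum : Int), Dom_getAbsSum input sum → Spec_getAbsSum input sum (getAbsSum input sum)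
def Claim_changed_getAbsSum : Prop := Dom_getAbsSum (pvDiffWitness_getAbsSum.1) (pvDiffWitness_getAbsSum.2) ∧ D_getAbsSum (pvDiffWitness_getAbsSum.1) (pvDiffWitness_getAbsSum.2) ∧ getAbsSum (pvDiffWitness_getAbsSum.1) (pvDiffWitness_getAbsSum.2) = pvDiffWitnessOut_getAbsSum.1 ∧ getAbsSum_alt (pvDiffWitness_getAbsSum.1) (pvDiffWitness_getAbsSum.2) = pvDiffWitnessOut_getAbsSum.2 ∧ pvDiffWitnessOut_getAbsSum.1 ≠ pvDiffWitnessOut_getAbsSum.2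
def Claim_exact_getAbsSum : Prop := ∀ (input : List Int) (sum : Int), Dom_getAbsSum input sum → D_getAbsSum input sum → getAbsSum input sum ≠ getAbsSum_alt input sum

-- ===== LEMMAS AND PROOFS =====

-- cm sum x ys = number of y in ys with |x - y| = sum
def cm (sum x : Int) (ys : List Int) : Int :=
  (ys.countP (fun y => decide (|x - y| = sum)) : Int)

-- T sum xs = number of index pairs i < j in xs with |xs[i] - xs[j]| = sum
def T (sum : Int) : List Int → Int
  | [] => 0
  | x :: xs => cm sum x xs + T sum xs

-- Scross sum p xs = Σ_{x ∈ xs} cm sum x p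
def Scross (sum : Int) (p : List Int) : List Int → Int
  | [] => 0
  | x :: t => cm sum x p + Scross sum p t

theorem cm_nil (sum x : Int) : cm sum x [] = 0 := rfl

theorem cm_cons (sum x y : Int) (ys : List Int) :
    cm sum x (y :: ys) = (if |x - y| = sum then 1 else 0) + cm sum x ys := by
  simp only [cm, List.countP_cons]
  by_cases h : |x - y| = sum <;> simp [h] <;> push_cast <;> ring

theorem cm_append (sum x : Int) (p q : List Int) :
    cm sum x (p ++ q) = cm sum x p + cm sum x q := by
  simp [cm, List.countP_append]

theorem cm_take_succ (sum x : Int) (ys : List Int) (k : Nat) (hk : k < ys.length) :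
    cm sum x (ys.take (k + 1)) =
      cm sum x (ys.take k) + (if |x - ys.getD k 0| = sum then 1 else 0) := by
  rw [List.take_add_one, List.getElem?_eq_getElem hk]
  simp only [Option.toList_some, cm_append, cm_cons, cm_nil,
    List.getD_eq_getElem ys 0 hk]
  ring

theorem T_short (sum : Int) (xs : List Int) (h : xs.length ≤ 1) : T sum xs = 0 := by
  match xs with
  | [] => rfl
  | [x] => simp [T, cm_nil]
  | x :: y :: t => simp at h

theorem T_neg (sum : Int) (h : sum < 0) (xs : List Int) : T sum xs = 0 := by
  induction xs with
  | nil => rfl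
  | cons x t ih =>
      have hcm : cm sum x t = 0 := by
        simp only [cm, Nat.cast_eq_zero, List.countP_eq_zero]
        intro y _
        simp only [decide_eq_true_eq]
        have := abs_nonneg (x - y)
        omega
      simp [T, ih, hcm]

theorem Scross_nil (sum : Int) (xs : List Int) : Scross sum [] xs = 0 := by
  induction xs with
  | nil => rfl
  | cons x t ih => simp [Scross, cm_nil, ih]

theorem Scross_append_singleton (sum z : Int) (p xs : List Int) :
    Scross sum (p ++ [z]) xs = Scross sum p xs + cm sum z xs := by
  induction xs with
  | nil => simp [Scross, cm_nil]
  | cons y t ih =>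
      simp only [Scross, ih, cm_append, cm_cons, cm_nil]
      rw [abs_sub_comm y z]
      ring

theorem cm_split (sum x : Int) (hs : 0 ≤ sum) (p : List Int) :
    (p.count (x - sum) : Int) + (if sum ≠ 0 then (p.count (x + sum) : Int) else 0) =
      cm sum x p := by
  induction p with
  | nil => simp [cm_nil]
  | cons y t ih =>
      rw [cm_cons, ← ih]
      simp only [List.count_cons, beq_iff_eq]
      have habs : (|x - y| = sum) ↔ (x - y = sum ∨ x - y = -sum) := abs_eq hs
      by_cases h0 : sum = 0 <;> split_ifs <;> push_cast <;> simp_all <;> omega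

-- B's fold, with the dict abstracted to the multiset of already-seen elements p.
theorem foldB (sum : Int) (hs : 0 ≤ sum) :
    ∀ (xs p : List Int) (c : Int) (d : PySem.Dict Int Int),
      (∀ v, d.getD v 0 = (p.count v : Int)) →
      (xs.foldl (altStep sum) (c, d)).1 = c + Scross sum p xs + T sum xs := by
  intro xs
  induction xs with
  | nil => intro p c d _; simp [Scross, T]
  | cons x t ih =>
      intro p c d hd
      have hc : (if sum ≠ 0 then (c + d.getD (x - sum) 0) + d.getD (x + sum) 0
                  else c + d.getD (x - sum) 0) = c + cm sum x p := by
        rw [hd, hd, ← cm_split sum x hs p]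
        split_ifs <;> ring
      have hd' : ∀ v, (d.insert x (d.getD x 0 + 1)).getD v 0 = ((p ++ [x]).count v : Int) := by
        intro v
        rw [PySem.Dict.getD_insert, List.count_append, hd]
        by_cases hv : v = x
        · rw [if_pos hv, hv]
          simp
        · rw [if_neg hv, List.count_singleton, if_neg (by simpa using fun h => hv h.symm)]
          simp only [Nat.cast_zero, add_zero]
          exact hd v
      show (t.foldl (altStep sum) (altStep sum (c, d) x)).1 = _
      rw [show altStep sum (c, d) x
            = (c + cm sum x p, d.insert x (d.getD x 0 + 1)) by
            simp only [altStep, ← hc]]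
      rw [ih (p ++ [x]) _ _ hd', Scross_append_singleton]
      simp only [Scross, T]
      ring

theorem alt_eq_T (input : List Int) (sum : Int) : getAbsSum_alt input sum = T sum input := by
  by_cases h : sum < 0
  · rw [getAbsSum_alt, if_pos h, T_neg sum h]
  · rw [getAbsSum_alt, if_neg h,
      foldB sum (by omega) input [] 0 PySem.Dict.empty (by simp), Scross_nil]
    ring

-- the loop lemma for A: from state (l, r) with l ≤ r, l < n-1, r ≤ n-1 and enough fuel,
-- the loop adds the matches of row l against indices l+1..r, all later full rows,
-- and the final self-pair check (1 iff sum = 0).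
theorem getAbsSumGo_eq (input : List Int) (sum : Int) :
    ∀ (fuel : Nat) (lN rN : Nat) (c : Int),
      lN + 1 < input.length → lN ≤ rN → rN + 1 ≤ input.length →
      (input.length - lN) * (input.length + 1) + rN + 1 ≤ fuel →
      getAbsSumGo input sum fuel (lN : Int) (rN : Int) c =
        c + cm sum (input.getD lN 0) ((input.drop (lN + 1)).take (rN - lN))
          + T sum (input.drop (lN + 1)) + (if sum = 0 then 1 else 0) := by
  intro fuel
  induction fuel with
  | zero =>
      intro lN rN c h1 h2 h3 hf
      exfalso; omega
  | succ f ih =>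
      intro lN rN c h1 h2 h3 hf
      have hguard : (lN : Int) < (input.length : Int) - 1 := by omega
      rw [getAbsSumGo, if_pos hguard]
      by_cases hrl : (rN : Int) = (lN : Int)
      · -- reset: l ← l+1, r ← n-1, check (l+1, n-1), continue at (l+1, n-2)
        have hrn : rN = lN := by exact_mod_cast hrl
        rw [if_pos hrl]
        have e3 : (input.length : Int) - 1 - 1 = ((input.length - 2 : Nat) : Int) := by omega
        have e2 : (input.length : Int) - 1 = ((input.length - 1 : Nat) : Int) := by omega
        have e1 : (lN : Int) + 1 = ((lN + 1 : Nat) : Int) := by omega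
        simp only []
        rw [e3, e2, e1, PySem.List.pyGetD_natCast, PySem.List.pyGetD_natCast]
        have htake : (input.drop (lN + 1)).take (rN - lN) = [] := by
          rw [hrn, Nat.sub_self, List.take_zero]
        -- split drop (lN+1) = input[lN+1] :: drop (lN+2)
        have hdropsplit : input.drop (lN + 1) = input.getD (lN + 1) 0 :: input.drop (lN + 2) := by
          rw [List.getD_eq_getElem input 0 (by omega : lN + 1 < input.length)]
          exact List.drop_eq_getElem_cons (by omega)
        by_cases hend : lN + 2 = input.length
        · -- l+1 = n-1: the check is the self pair (n-1, n-1); the next call exits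
          have hsame : input.getD (lN + 1) 0 = input.getD (input.length - 1) 0 := by
            congr 1; omega
          have hstop : ∀ c'', getAbsSumGo input sum f (((lN + 1 : Nat)) : Int) (((input.length - 2 : Nat)) : Int) c'' = c'' := by
            intro c''
            match f with
            | 0 => rfl
            | f' + 1 =>
                rw [getAbsSumGo, if_neg (by omega)]
          rw [hstop]
          rw [show ((input.getD (lN + 1) 0 : Int)) = input.getD (input.length - 1) 0 from hsame,
            sub_self, abs_zero]
          have hdrop2 : input.drop (lN + 2) = [] := List.drop_eq_nil_of_le (by omega)
          rw [htake, hdropsplit, hdrop2]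
          simp only [T, cm_nil]
          by_cases hz : (0 : Int) = sum
          · rw [if_pos hz, if_pos hz.symm]; ring
          · rw [if_neg hz, if_neg (fun h => hz h.symm)]; ring
        · -- l+1 < n-1: one check against index n-1, then IH at (l+1, n-2)
          have hrec := ih (lN + 1) (input.length - 2)
            (if |input.getD (lN + 1) 0 - input.getD (input.length - 1) 0| = sum then c + 1 else c)
            (by omega) (by omega) (by omega)
            (by
              have hexp : (input.length - (lN + 1)) * (input.length + 1) + (input.length + 1)
                  = (input.length - lN) * (input.length + 1) := by
                have h9 : input.length - lN = (input.length - (lN + 1)) + 1 := by omega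
                rw [h9]; ring
              omega)
          rw [hrec]
          -- full row l+1 = partial row (up to n-2) plus the element at index n-1
          have hk4 : input.length - lN - 3 < (input.drop (lN + 2)).length := by
            simp only [List.length_drop]; omega
          have hgd : (input.drop (lN + 2)).getD (input.length - lN - 3) 0
              = input.getD (input.length - 1) 0 := by
            rw [List.getD_eq_getElem _ 0 hk4, List.getElem_drop,
              List.getD_eq_getElem input 0 (by omega : input.length - 1 < input.length)]
            congr 1
            simp only [List.length_drop] at hk4
            omega
          have hrows : cm sum (input.getD (lN + 1) 0) (input.drop (lN + 2))
              = cm sum (input.getD (lN + 1) 0) ((input.drop (lN + 2)).take (input.length - 2 - (lN + 1)))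
                + (if |input.getD (lN + 1) 0 - input.getD (input.length - 1) 0| = sum then 1 else 0) := by
            have hlen2 : (input.drop (lN + 2)).length = (input.length - lN - 3) + 1 := by
              simp only [List.length_drop]; omega
            have h5 := cm_take_succ sum (input.getD (lN + 1) 0) (input.drop (lN + 2))
              (input.length - lN - 3) hk4
            rw [List.take_of_length_le (le_of_eq hlen2)] at h5
            rw [h5, hgd, show input.length - 2 - (lN + 1) = input.length - lN - 3 by omega]
          rw [htake, hdropsplit]
          simp only [T, cm_nil, show lN + 1 + 1 = lN + 2 from rfl]
          rw [hrows]
          split_ifs <;> ring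
      · -- no reset: r > l, check (l, r), continue at (l, r-1)
        have hlr : lN < rN := by
          have hne : rN ≠ lN := fun h => hrl (by exact_mod_cast h)
          omega
        rw [if_neg hrl]
        have e1 : (rN : Int) - 1 = ((rN - 1 : Nat) : Int) := by omega
        simp only []
        rw [e1, PySem.List.pyGetD_natCast, PySem.List.pyGetD_natCast]
        rw [ih lN (rN - 1)
          (if |input.getD lN 0 - input.getD rN 0| = sum then c + 1 else c)
          (by omega) (by omega) (by omega) (by omega)]
        have hk : rN - 1 - lN < (input.drop (lN + 1)).length := by
          simp only [List.length_drop]; omega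
        have hgd : (input.drop (lN + 1)).getD (rN - 1 - lN) 0 = input.getD rN 0 := by
          rw [List.getD_eq_getElem _ 0 hk, List.getElem_drop,
            List.getD_eq_getElem input 0 (by omega : rN < input.length)]
          congr 1
          simp only [List.length_drop] at hk
          omega
        rw [show rN - lN = (rN - 1 - lN) + 1 by omega, cm_take_succ sum _ _ _ hk, hgd]
        split_ifs <;> ring

-- A = true pair count + 1 extra iff (sum = 0 and len ≥ 2)
theorem A_eq (input : List Int) (sum : Int) :
    getAbsSum input sum = T sum input + (if sum = 0 ∧ 2 ≤ input.length then 1 else 0) := by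
  by_cases h2 : 2 ≤ input.length
  · have h := getAbsSumGo_eq input sum ((input.length + 1) * (input.length + 2)) 0 (input.length - 1) 0
      (by omega) (by omega) (by omega)
      (by
        have hexp : (input.length + 1) * (input.length + 2)
            = (input.length - 0) * (input.length + 1) + 2 * input.length + 2 := by
          simp only [Nat.sub_zero]; ring
        omega)
    simp only [Nat.cast_zero] at h
    rw [show ((input.length - 1 : Nat) : Int) = (input.length : Int) - 1 by omega] at h
    rw [getAbsSum, h]
    have htake : (input.drop (0 + 1)).take (input.length - 1 - 0) = input.drop 1 := by
      simp only [Nat.zero_add, Nat.sub_zero]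
      exact List.take_of_length_le (by simp)
    have hsplit : input = input.getD 0 0 :: input.drop 1 := by
      rw [List.getD_eq_getElem input 0 (by omega : 0 < input.length)]
      simpa using List.drop_eq_getElem_cons (l := input) (i := 0) (by omega)
    rw [htake]
    have hiff : (sum = 0 ∧ 2 ≤ input.length) ↔ (sum = 0) := by
      constructor
      · exact fun h => h.1
      · exact fun h => ⟨h, h2⟩
    rw [if_congr hiff rfl rfl]
    conv_rhs => rw [hsplit]
    simp only [T, Nat.zero_add]
    ring
  · -- len ≤ 1: the loop never runs, both sides are 0
    rw [getAbsSum,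
      show (input.length + 1) * (input.length + 2) = ((input.length + 1) * (input.length + 2) - 1) + 1 by
        have hpos : 0 < (input.length + 1) * (input.length + 2) :=
          Nat.mul_pos (by omega) (by omega)
        omega,
      getAbsSumGo, if_neg (by omega), T_short sum input (by omega),
      if_neg (by omega)]
    ring

-- ===== VERDICT (by name: the statement is the Claim_ definition above) =====
theorem getAbsSum_spec : Claim_unchanged_getAbsSum := by
  intro input sum _ hD
  show getAbsSum input sum = getAbsSum_alt input sum
  have hD' : ¬ (sum = 0 ∧ 2 ≤ input.length) := hD
  rw [A_eq, alt_eq_T, if_neg hD']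
  ring

theorem getAbsSum_changed : Claim_changed_getAbsSum := by
  unfold Claim_changed_getAbsSum; decide

theorem getAbsSum_tight : Claim_exact_getAbsSum := by
  intro input sum _ hD
  have hD' : sum = 0 ∧ 2 ≤ input.length := hD
  rw [A_eq, alt_eq_T, if_pos hD']
  omega
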